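-- pv_equiv track=rewrite | github.com/venux021/soda | zcy2/c5/q03.py | remove_0_ktimes
-- ===== SOURCE A (Python) =====
-- def remove_0_ktimes(s, k):
--     buf = []
--     i = 0
--     n = len(s)
--     while i < n:
--         if s[i] != '0':
--             buf.append(s[i])
--             i += 1
--         else:
--             j = i
--             while j < n and s[j] == '0':
--                 j += 1
--             if j - i != k:
--                 for _ in range(j-i):
--                     buf.append('0')
--             i = j
--     return ''.join(buf)
-- ===== SOURCE B (Python) =====
-- def remove_0_ktimes(s, k):
--     # stage 1: run-length encode the whole string into (char, count) pairs
--     runs = []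
--     for ch in s:
--         if runs and runs[-1][0] == ch:
--             runs[-1] = (ch, runs[-1][1] + 1)
--         else:
--             runs.append((ch, 1))
--     # stage 2: drop zero-runs of length exactly k, decode and join the rest
--     return ''.join(ch * m for ch, m in runs if ch != '0' or m != k)
-- ===== Notes on version B (the rewrite author's own statement) =====
-- stated objective: alternative
-- what changed: B replaces A's index scan with a buffer (outer while, inner zero-run while, replay append loop) by a staged pipeline: run-length-encode the whole string into (char,count) pairs, then declaratively filter out ('0',k) runs and join the decoded runs.
import Mathlib
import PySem

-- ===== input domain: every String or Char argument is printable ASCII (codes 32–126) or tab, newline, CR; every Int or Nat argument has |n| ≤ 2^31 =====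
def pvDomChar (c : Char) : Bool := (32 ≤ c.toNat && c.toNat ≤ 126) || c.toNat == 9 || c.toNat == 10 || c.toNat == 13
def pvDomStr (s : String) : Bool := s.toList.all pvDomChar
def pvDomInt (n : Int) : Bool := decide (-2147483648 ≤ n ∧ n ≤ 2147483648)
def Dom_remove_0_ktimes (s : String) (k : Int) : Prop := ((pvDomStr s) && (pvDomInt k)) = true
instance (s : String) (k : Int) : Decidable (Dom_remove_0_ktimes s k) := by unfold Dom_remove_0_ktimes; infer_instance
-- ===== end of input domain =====

-- B replaces A's index scan with a character buffer by a staged pipeline: run-length-encode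
-- the string into (char,count) runs, filter out the ('0',k) runs, join the decoded rest
-- (objective: alternative; same O(n) cost).

-- ===== PORT A =====
-- the outer while loop over i, with buf the accumulated characters; the inner while
-- (counting the zero run starting at i) is the takeWhile/dropWhile pair, and the
-- `for _ in range(j-i)` append loop is List.replicate of that run length
def goA (k : Int) : List Char → List Char → List Char
  | [], buf => buf
  | c :: rest, buf =>
    if c ≠ '0' then goA k rest (buf ++ [c])
    else
      goA k ((c :: rest).dropWhile (· = '0'))
        (if (((c :: rest).takeWhile (· = '0')).length : Int) ≠ k then
            buf ++ List.replicate ((c :: rest).takeWhile (· = '0')).length '0'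
         else buf)
  termination_by cs => cs.length
  decreasing_by
    · simp
    · simp only [List.dropWhile]
      simp_all
      exact List.length_dropWhile_le _ _

def remove_0_ktimes (s : String) (k : Int) : String := String.ofList (goA k s.toList [])

-- ===== PORT B =====
-- the loop body of Source B's stage 1: extend the last run or start a new one
def rleStep (runs : List (Char × Nat)) (ch : Char) : List (Char × Nat) :=
  match runs.getLast? with
  | some last => if last.1 = ch then runs.dropLast ++ [(ch, last.2 + 1)]
                 else runs ++ [(ch, 1)]
  | none => runs ++ [(ch, 1)]

-- stage 2: ''.join(ch * m for ch, m in runs if ch != '0' or m != k)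
def remove_0_ktimes_alt (s : String) (k : Int) : String :=
  String.join (((s.toList.foldl rleStep []).filter
      (fun p => p.1 != '0' || (p.2 : Int) != k)).map
    (fun p => String.ofList (List.replicate p.2 p.1)))

-- ===== PRECONDITION & SPEC =====
def Spec_remove_0_ktimes (s : String) (k : Int) (out : String) : Prop := out = remove_0_ktimes_alt s k
instance (s : String) (k : Int) (out : String) : Decidable (Spec_remove_0_ktimes s k out) := by unfold Spec_remove_0_ktimes; infer_instance

-- ===== CLAIM (what is proved, stated in full; the proofs are below) =====
def Claim_equal_remove_0_ktimes : Prop := ∀ (s : String) (k : Int), Dom_remove_0_ktimes s k → Spec_remove_0_ktimes s k (remove_0_ktimes s k)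

-- ===== LEMMAS AND PROOFS =====

-- canonical run-length encoding by maximal runs (proof-side reference)
def runsOf : List Char → List (Char × Nat)
  | [] => []
  | c :: rest =>
      (c, ((c :: rest).takeWhile (· = c)).length) :: runsOf ((c :: rest).dropWhile (· = c))
  termination_by cs => cs.length
  decreasing_by
    simp only [List.dropWhile]
    simp_all
    exact List.length_dropWhile_le _ _

theorem runsOf_nil : runsOf [] = [] := by unfold runsOf; rfl

theorem runsOf_cons (c : Char) (rest : List Char) :
    runsOf (c :: rest)
      = (c, ((c :: rest).takeWhile (· = c)).length) :: runsOf ((c :: rest).dropWhile (· = c)) := by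
  rw [runsOf.eq_def]

-- filtered decode of a run list, as a character list
def decodeF (k : Int) (runs : List (Char × Nat)) : List Char :=
  (runs.filter (fun p => p.1 != '0' || (p.2 : Int) != k)).flatMap
    (fun p => List.replicate p.2 p.1)

theorem foldl_rleStep_cont (cs : List Char) :
    ∀ (acc : List (Char × Nat)) (c : Char) (m : Nat),
    List.foldl rleStep (acc ++ [(c, m)]) cs
      = acc ++ (c, m + (cs.takeWhile (· = c)).length) :: runsOf (cs.dropWhile (· = c)) := by
  induction cs with
  | nil => intro acc c m; simp [runsOf_nil]
  | cons d t ih =>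
      intro acc c m
      simp only [List.foldl_cons, rleStep, List.getLast?_concat, List.dropLast_concat]
      by_cases hdc : d = c
      · subst hdc
        rw [if_pos rfl, ih acc d (m + 1)]
        have htw : (d :: t).takeWhile (· = d) = d :: t.takeWhile (· = d) := by
          simp
        have hdw : (d :: t).dropWhile (· = d) = t.dropWhile (· = d) := by
          simp
        rw [htw, hdw, List.length_cons,
          show m + 1 + (t.takeWhile (· = d)).length
             = m + ((t.takeWhile (· = d)).length + 1) by omega]
      · rw [if_neg (fun h => hdc (by simpa using h.symm)),
          show acc ++ [(c, m)] ++ [(d, 1)] = (acc ++ [(c, m)]) ++ [(d, 1)] by simp,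
          ih (acc ++ [(c, m)]) d 1]
        have h1 : (d :: t).takeWhile (· = c) = ([] : List Char) := by
          simp [hdc]
        have h2 : (d :: t).dropWhile (· = c) = d :: t := by
          simp [hdc]
        rw [h1, h2, runsOf_cons]
        have htw : (d :: t).takeWhile (· = d) = d :: t.takeWhile (· = d) := by
          simp
        have hdw : (d :: t).dropWhile (· = d) = t.dropWhile (· = d) := by
          simp
        rw [htw, hdw, List.length_cons,
          show (1 : Nat) + (t.takeWhile (· = d)).length
             = (t.takeWhile (· = d)).length + 1 by omega]
        simp

theorem foldl_rleStep_eq_runsOf (cs : List Char) :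
    List.foldl rleStep [] cs = runsOf cs := by
  cases cs with
  | nil => simp [runsOf_nil]
  | cons c t =>
      simp only [List.foldl_cons, rleStep, List.getLast?_nil, List.nil_append]
      rw [show ([(c, 1)] : List (Char × Nat)) = [] ++ [(c, 1)] by simp,
        foldl_rleStep_cont t [] c 1, runsOf_cons]
      have htw : (c :: t).takeWhile (· = c) = c :: t.takeWhile (· = c) := by
        simp
      have hdw : (c :: t).dropWhile (· = c) = t.dropWhile (· = c) := by
        simp
      rw [htw, hdw, List.length_cons,
        show (1 : Nat) + (t.takeWhile (· = c)).length
           = (t.takeWhile (· = c)).length + 1 by omega]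
      simp

theorem decodeF_cons_nonzero (k : Int) (c : Char) (rest : List Char) (hc : c ≠ '0') :
    decodeF k (runsOf (c :: rest)) = c :: decodeF k (runsOf rest) := by
  cases rest with
  | nil =>
      rw [runsOf_cons, runsOf_nil]
      simp [decodeF, runsOf_nil, hc]
  | cons d t =>
      by_cases hdc : d = c
      · subst hdc
        rw [runsOf_cons, runsOf_cons]
        have h1 : (d :: d :: t).takeWhile (· = d) = d :: (d :: t).takeWhile (· = d) := by
          simp
        have h2 : (d :: d :: t).dropWhile (· = d) = (d :: t).dropWhile (· = d) := by
          simp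
        rw [h1, h2]
        simp [decodeF, hc, List.replicate_succ]
      · rw [runsOf_cons]
        have h1 : (c :: d :: t).takeWhile (· = c) = [c] := by
          simp [hdc]
        have h2 : (c :: d :: t).dropWhile (· = c) = d :: t := by
          simp [hdc]
        rw [h1, h2]
        simp [decodeF, hc]

theorem goA_eq (k : Int) (cs buf : List Char) :
    goA k cs buf = buf ++ decodeF k (runsOf cs) := by
  induction cs, buf using goA.induct k with
  | case1 buf => simp [goA, runsOf_nil, decodeF]
  | case2 c rest buf hc ih =>
      rw [goA, if_pos hc, ih, decodeF_cons_nonzero k c rest (by simpa using hc)]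
      simp
  | case3 c rest buf hc ih =>
      have hc0 : c = '0' := by simpa using hc
      simp only [dite_eq_ite] at ih
      rw [goA, if_neg hc, ih]
      subst hc0
      rw [runsOf_cons]
      set zl := (('0' :: rest).takeWhile (· = '0')).length with hzl
      simp only [decodeF, List.filter_cons]
      by_cases hk : (zl : Int) = k
      · rw [if_neg (not_not_intro hk)]
        have hcond : (('0' : Char) != '0' || (zl : Int) != k) = false := by simp [hk]
        rw [hcond]
        simp
      · rw [if_pos hk]
        have hcond : (('0' : Char) != '0' || (zl : Int) != k) = true := by simp [hk]
        rw [hcond]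
        simp [List.append_assoc]

theorem join_shift (l : List String) (a : String) :
    List.foldl (fun r s => r ++ s) a l = a ++ List.foldl (fun r s => r ++ s) "" l := by
  induction l generalizing a with
  | nil => simp
  | cons x t ih =>
      simp only [List.foldl_cons]
      rw [ih (a ++ x), ih ("" ++ x)]
      simp [String.append_assoc]

theorem join_cons (a : String) (l : List String) :
    String.join (a :: l) = a ++ String.join l := by
  simp only [String.join, List.foldl_cons]
  rw [join_shift]
  simp

theorem join_map_ofList (l : List (Char × Nat)) :
    String.join (l.map (fun p => String.ofList (List.replicate p.2 p.1)))
      = String.ofList (l.flatMap (fun p => List.replicate p.2 p.1)) := by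
  induction l with
  | nil => simp [String.join]
  | cons p t ih => simp [join_cons, ih]

-- ===== VERDICT (by name: the statement is the Claim_ definition above) =====
theorem remove_0_ktimes_spec : Claim_equal_remove_0_ktimes := by
  intro s k _
  unfold Spec_remove_0_ktimes remove_0_ktimes remove_0_ktimes_alt
  rw [goA_eq, foldl_rleStep_eq_runsOf, join_map_ofList]
  simp [decodeF]
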